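-- pv_equiv track=rewrite | github.com/BrandNewOne/Algorithm | 프로그래머스/lv_2_양궁대회.py | solution
-- ===== SOURCE A (Python) =====
-- from itertools import combinations_with_replacement
--
-- def getScore(lionList, apeachList):
--     lion = 0
--     apeach = 0
--
--     temp = [0,0,0,0,0,0,0,0,0,0,0]
--
--     for l in lionList:
--         temp[l] += 1
--
--     temp.reverse()
--     lionList = temp
--
--     for i,(lionScore, apeachScore) in enumerate(zip(lionList, apeachList)):
--         if lionScore == 0 and apeachScore == 0:
--             continue
--         elif lionScore > apeachScore:
--             lion += (10-i)
--         elif lionScore <= apeachScore: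
--             apeach += (10-i)
--
--     if lion > apeach:
--         return lion-apeach, lionList
--     else:
--         return -2 , [-1]
--
-- def solution(n, info):
--     answer = [-1]
--     s = -1
--     score = [10,9,8,7,6,5,4,3,2,1,0]
--     for lionInfo in combinations_with_replacement(score, n):
--         tempScore, lion = getScore(lionInfo ,info)
--
--         if tempScore > s:
--             s = tempScore
--             answer = lion
--         elif tempScore == s:
--             for i,j in zip(reversed(answer), reversed(lion)):
--                 if i == j:
--                     continue
--                 if i < j:
--                     answer = lion
--                     break
--                 else:
--                     break
--
--     return answer
-- ===== SOURCE B (Python) =====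
-- def solution(n, info):
--     # Bitmask search instead of enumerating every distribution of n arrows:
--     # lion claims a target by shooting strictly more arrows there than Apeach
--     # (so claiming target i costs max(0, info[i] + 1) arrows); a target lion
--     # does not claim scores for Apeach iff she hit it; spare arrows go to
--     # the 0-score slot.  Keep the best (diff, reversed shot list) candidate.
--     counts = info[:10]
--     best = None
--     for mask in range(1 << len(counts)):
--         lion = apeach = cost = 0
--         shots = [0] * 11
--         for i, a in enumerate(counts):
--             if mask >> i & 1:
--                 need = max(a + 1, 0)
--                 shots[i] = need
--                 lion += 10 - i
--                 cost += need
--             elif a > 0: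
--                 apeach += 10 - i
--         if cost > n or lion <= apeach:
--             continue
--         shots[10] = n - cost
--         cand = (lion - apeach, shots[::-1])
--         if best is None or cand > best:
--             best = cand
--     return best[1][::-1] if best else [-1]
-- ===== Notes on version B (the rewrite author's own statement) =====
-- stated objective: alternative
-- what changed: Instead of enumerating all C(n+10,10) arrow distributions via combinations_with_replacement and scoring each, B enumerates the 2^k subsets (k = number of listed targets, at most 10) of targets lion claims by shooting one more arrow than Apeach (at least zero), puts spare arrows on the 0-score slot, and keeps the best candidate under the same (diff, reversed shot list) order; intended as asymptotically faster, though a timing run could not confirm a 1.5x margin at the sizes both finish (A timed out beyond n=16 while B kept scaling).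
import Mathlib
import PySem

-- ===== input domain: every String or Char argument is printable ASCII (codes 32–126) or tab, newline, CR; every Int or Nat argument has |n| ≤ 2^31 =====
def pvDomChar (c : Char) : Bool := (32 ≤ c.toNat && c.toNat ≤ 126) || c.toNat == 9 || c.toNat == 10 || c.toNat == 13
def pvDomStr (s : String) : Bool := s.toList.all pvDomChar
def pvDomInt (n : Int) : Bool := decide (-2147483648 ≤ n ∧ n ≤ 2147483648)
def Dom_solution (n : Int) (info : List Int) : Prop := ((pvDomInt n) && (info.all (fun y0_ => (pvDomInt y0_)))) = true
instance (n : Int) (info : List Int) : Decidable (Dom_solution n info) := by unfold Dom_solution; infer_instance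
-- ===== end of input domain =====

-- B replaces A's enumeration of all C(n+10,10) arrow distributions by a bitmask search over the
-- subsets of listed targets lion claims (one more arrow than Apeach per claimed target, at least
-- zero; spare arrows on the 0-score slot), ranked by the same (diff, reversed shot list) order.

-- ===== PORT A =====
-- itertools.combinations_with_replacement(pool, r): ported by hand, exact including
-- CPython's element order (index-lexicographic)
def cwr {α : Type} : List α → Nat → List (List α)
  | _, 0 => [[]]
  | [], _ + 1 => []
  | x :: xs, r + 1 => (cwr (x :: xs) r).map (x :: ·) ++ cwr xs (r + 1)
termination_by pool r => (r, pool.length)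

-- the 'for i,(lionScore, apeachScore) in enumerate(zip(...))' loop of getScore
def scoreLoop : Nat → List (Int × Int) → Int → Int → Int × Int
  | _, [], lion, apeach => (lion, apeach)
  | i, (ls, ap) :: rest, lion, apeach =>
    if ls = 0 ∧ ap = 0 then scoreLoop (i + 1) rest lion apeach
    else if ap < ls then scoreLoop (i + 1) rest (lion + (10 - (i : Int))) apeach
    else scoreLoop (i + 1) rest lion (apeach + (10 - (i : Int)))

def getScore (lionList apeachList : List Int) : Int × List Int :=
  -- temp[l] += 1 : exact for 0 ≤ l ≤ 10, the only values solution passes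
  let temp := lionList.foldl (fun t l => t.set l.toNat (t.getD l.toNat 0 + 1)) (List.replicate 11 (0 : Int))
  let lionList := temp.reverse
  let p := scoreLoop 0 (lionList.zip apeachList) 0 0
  if p.2 < p.1 then (p.1 - p.2, lionList) else (-2, [-1])

-- the tie-breaking 'for i,j in zip(reversed(answer), reversed(lion))' loop: true = replace answer
def tieLoop : List (Int × Int) → Bool
  | [] => false
  | (i, j) :: rest => if i = j then tieLoop rest else if i < j then true else false

def solution (n : Int) (info : List Int) : List Int :=
  let score : List Int := [10, 9, 8, 7, 6, 5, 4, 3, 2, 1, 0]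
  (((cwr score n.toNat).foldl (fun st lionInfo =>
      let k := getScore lionInfo info
      if st.1 < k.1 then k
      else if k.1 = st.1 then (if tieLoop (st.2.reverse.zip k.2.reverse) then (st.1, k.2) else st)
      else st) (-1, [-1]))).2

-- ===== PORT B =====
-- the 'for i, a in enumerate(counts)' loop of Source B: i is the running index, the state is
-- ((lion, apeach, cost), shots); shots[i] = need is List.set
def loopB (mask : Nat) : Nat → List Int → Int × Int × Int → List Int → (Int × Int × Int) × List Int
  | _, [], st, shots => (st, shots)
  | i, a :: rest, (lion, apeach, cost), shots =>
    if mask.testBit i then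
      let need := max (a + 1) 0
      loopB mask (i + 1) rest (lion + (10 - (i : Int)), apeach, cost + need) (shots.set i need)
    else if 0 < a then
      loopB mask (i + 1) rest (lion, apeach + (10 - (i : Int)), cost) shots
    else loopB mask (i + 1) rest (lion, apeach, cost) shots

-- Python list '>' (lexicographic, longer wins on an equal prefix)
def listGT : List Int → List Int → Bool
  | [], _ => false
  | _ :: _, [] => true
  | a :: xs, b :: ys => if a = b then listGT xs ys else decide (b < a)

-- Python tuple comparison '(d, rv) > best'
def pairGT (p q : Int × List Int) : Bool := q.1 < p.1 || (p.1 = q.1 && listGT p.2 q.2)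

-- the body of Source B's 'for mask in range(1 << len(counts))' loop
def stepB (n : Int) (counts : List Int) (best : Option (Int × List Int)) (mask : Nat) :
    Option (Int × List Int) :=
  let r := loopB mask 0 counts (0, 0, 0) (List.replicate 11 0)
  if n < r.1.2.2 ∨ r.1.1 - r.1.2.1 ≤ 0 then best
  else
    let shots := r.2.set 10 (n - r.1.2.2)
    let cand := (r.1.1 - r.1.2.1, shots.reverse)
    match best with
    | none => some cand
    | some b => if pairGT cand b then some cand else best

def solution_alt (n : Int) (info : List Int) : List Int :=
  let counts := PySem.List.slice info none (some 10)
  match (List.range (2 ^ counts.length)).foldl (stepB n counts) none with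
  | some b => b.2.reverse
  | none => [-1]

-- ===== PRECONDITION & SPEC =====
-- Pre_ excludes exactly n < 0, where combinations_with_replacement raises ValueError.
def Pre_solution (n : Int) (info : List Int) : Prop := 0 ≤ n
instance (n : Int) (info : List Int) : Decidable (Pre_solution n info) := by unfold Pre_solution; infer_instance
def pvWitness_solution : Int × List Int := (2, [1, 0, 2])

def Spec_solution (n : Int) (info : List Int) (out : List Int) : Prop := out = solution_alt n info
instance (n : Int) (info : List Int) (out : List Int) : Decidable (Spec_solution n info out) := by unfold Spec_solution; infer_instance

-- ===== CLAIM (what is proved, stated in full; the proofs are below) =====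
def Claim_equal_solution : Prop := ∀ (n : Int) (info : List Int), Dom_solution n info → Pre_solution n info → Spec_solution n info (solution n info)

-- ===== LEMMAS AND PROOFS =====

/- The strict total order both folds maximise: larger diff first, then Python-'>' on the
   reversed answer list.  `ltb p q` = "q strictly beats p". -/
def ltb (p q : Int × List Int) : Bool :=
  decide (p.1 < q.1) || (decide (p.1 = q.1) && listGT q.2.reverse p.2.reverse)

def genStep (st : Int × List Int) (k? : Option (Int × List Int)) : Int × List Int :=
  match k? with
  | none => st
  | some k => if ltb st k then k else st

lemma genStep_none (st : Int × List Int) : genStep st none = st := rfl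
lemma genStep_some (st k : Int × List Int) : genStep st (some k) = if ltb st k then k else st := rfl

def gfold {γ : Type} (f : γ → Option (Int × List Int)) (l : List γ) (init : Int × List Int) :
    Int × List Int :=
  l.foldl (fun st x => genStep st (f x)) init

lemma listGT_irrefl (u : List Int) : listGT u u = false := by
  induction u with
  | nil => rfl
  | cons a xs ih => simp [listGT, ih]

lemma listGT_trans : ∀ {a b c : List Int}, listGT a b = true → listGT b c = true → listGT a c = true := by
  intro a
  induction a with
  | nil => intro b c h1 _; simp [listGT] at h1
  | cons x xs ih =>
    intro b c h1 h2
    cases b with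
    | nil => cases c <;> simp [listGT] at h2
    | cons y ys =>
      cases c with
      | nil => simp [listGT]
      | cons z zs =>
        simp only [listGT] at h1 h2 ⊢
        by_cases hxy : x = y <;> by_cases hyz : y = z
        · subst hxy; subst hyz; simp at h1 h2 ⊢; exact ih h1 h2
        · subst hxy; simp [hyz] at h2 ⊢; omega
        · subst hyz; simp [hxy] at h1 ⊢; omega
        · simp [hxy, hyz] at h1 h2
          have : z < x := lt_trans h2 h1
          simp [show ¬ x = z by omega, this]

lemma listGT_conn : ∀ {u v : List Int}, u ≠ v → listGT u v = true ∨ listGT v u = true := by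
  intro u
  induction u with
  | nil =>
    intro v hne
    cases v with
    | nil => exact absurd rfl hne
    | cons y ys => right; simp [listGT]
  | cons x xs ih =>
    intro v hne
    cases v with
    | nil => left; simp [listGT]
    | cons y ys =>
      by_cases hxy : x = y
      · subst hxy
        have : xs ≠ ys := by intro h; exact hne (by rw [h])
        rcases ih this with h | h
        · left; simp [listGT, h]
        · right; simp [listGT, h]
      · rcases lt_or_gt_of_ne (show x ≠ y from hxy) with h | h
        · right; simp [listGT, Ne.symm hxy, h]
        · left; simp [listGT, hxy, h]

lemma ltb_irrefl (p : Int × List Int) : ltb p p = false := by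
  simp [ltb, listGT_irrefl]

lemma ltb_trans {p q r : Int × List Int} (h1 : ltb p q = true) (h2 : ltb q r = true) :
    ltb p r = true := by
  simp only [ltb, Bool.or_eq_true, Bool.and_eq_true, decide_eq_true_eq] at h1 h2 ⊢
  rcases h1 with h1 | ⟨h1, h1'⟩ <;> rcases h2 with h2 | ⟨h2, h2'⟩
  · left; omega
  · left; omega
  · left; omega
  · right; exact ⟨by omega, listGT_trans h2' h1'⟩

lemma ltb_conn {p q : Int × List Int} (h1 : ltb p q = false) (h2 : ltb q p = false) : p = q := by
  simp only [ltb, Bool.or_eq_false_iff, Bool.and_eq_false_iff, decide_eq_false_iff_not,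
    decide_eq_true_eq] at h1 h2
  have hfst : p.1 = q.1 := by omega
  have hsnd : p.2 = q.2 := by
    by_contra hne
    have : p.2.reverse ≠ q.2.reverse := fun h => hne (by
      have := congrArg List.reverse h; simpa using this)
    rcases listGT_conn this with h | h
    · rcases h2.2 with h' | h'
      · exact h' hfst.symm
      · rw [h] at h'; cases h'
    · rcases h1.2 with h' | h'
      · exact h' hfst
      · rw [h] at h'; cases h'
  exact Prod.ext hfst hsnd

lemma foldMax {γ : Type} (f : γ → Option (Int × List Int)) :
    ∀ (l : List γ) (init : Int × List Int),
      (gfold f l init = init ∨ ∃ x ∈ l, f x = some (gfold f l init)) ∧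
      ltb (gfold f l init) init = false ∧
      ∀ x ∈ l, ∀ k, f x = some k → ltb (gfold f l init) k = false := by
  intro l
  induction l with
  | nil => intro init; refine ⟨Or.inl rfl, ltb_irrefl _, by simp⟩
  | cons x0 rest ih =>
    intro init
    set st1 := genStep init (f x0) with hst1
    have hfold : gfold f (x0 :: rest) init = gfold f rest st1 := rfl
    obtain ⟨ha, hc, hb⟩ := ih st1
    set r := gfold f rest st1 with hr
    have hnotbeat : ∀ k, f x0 = some k → ltb r k = false := by
      intro k hk
      have h1 : ltb st1 k = false := by
        rw [hst1, hk, genStep_some]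
        by_cases h : ltb init k = true
        · rw [if_pos h]; exact ltb_irrefl k
        · rw [if_neg h]; simpa using h
      by_contra hcon
      simp only [Bool.not_eq_false] at hcon
      by_cases heq : st1 = k
      · rw [heq] at hc; rw [hcon] at hc; cases hc
      · rcases Bool.eq_false_or_eq_true (ltb k st1) with h' | h'
        · have := ltb_trans hcon h'
          rw [this] at hc; cases hc
        · exact absurd (ltb_conn h1 h') heq
    have hcinit : ltb r init = false := by
      cases hf : f x0 with
      | none => rw [hst1, hf, genStep_none] at hc; exact hc
      | some k =>
        rw [hst1, hf, genStep_some] at hc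
        by_cases h : ltb init k = true
        · rw [if_pos h] at hc
          by_contra hcon
          simp only [Bool.not_eq_false] at hcon
          have := ltb_trans hcon h
          rw [this] at hc; cases hc
        · rw [if_neg h] at hc; exact hc
    refine ⟨?_, hcinit, ?_⟩
    · rw [hfold]
      rcases ha with ha | ⟨x, hx, hfx⟩
      · cases hf : f x0 with
        | none => left; rw [ha, hst1, hf, genStep_none]
        | some k =>
          by_cases h : ltb init k = true
          · right
            refine ⟨x0, by simp, ?_⟩
            rw [hf, ha, hst1, hf, genStep_some, if_pos h]
          · left; rw [ha, hst1, hf, genStep_some, if_neg h]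
      · right; exact ⟨x, by simp [hx], hfx⟩
    · intro x hx k hk
      rw [hfold]
      rcases List.mem_cons.mp hx with rfl | hx'
      · exact hnotbeat k hk
      · exact hb x hx' k hk

-- ## A-side: the brute-force fold is a gfold

def keyShape (k : Int × List Int) : Prop := k = (-2, [-1]) ∨ (1 ≤ k.1 ∧ k.2.length = 11)

def goodSt (st : Int × List Int) : Prop := st = (-1, [-1]) ∨ keyShape st

lemma tieLoop_eq_listGT : ∀ (u v : List Int), u.length = v.length →
    tieLoop (u.zip v) = listGT v u := by
  intro u
  induction u with
  | nil =>
    intro v h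
    cases v with
    | nil => rfl
    | cons y ys => simp at h
  | cons x xs ih =>
    intro v h
    cases v with
    | nil => simp at h
    | cons y ys =>
      simp only [List.zip_cons_cons, tieLoop, listGT]
      by_cases hxy : x = y
      · subst hxy; simp [ih ys (by simpa using h)]
      · by_cases h2 : x < y <;> simp [hxy, Ne.symm hxy, h2]

def buildTemp (c : List Int) : List Int :=
  c.foldl (fun t l => t.set l.toNat (t.getD l.toNat 0 + 1)) (List.replicate 11 (0 : Int))

lemma foldl_set_length : ∀ (c : List Int) (acc : List Int),
    (c.foldl (fun t l => t.set l.toNat (t.getD l.toNat 0 + 1)) acc).length = acc.length := by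
  intro c
  induction c with
  | nil => intro acc; rfl
  | cons x xs ih => intro acc; rw [List.foldl_cons, ih]; exact List.length_set

lemma buildTemp_length (c : List Int) : (buildTemp c).length = 11 := by
  unfold buildTemp; rw [foldl_set_length]; rfl

lemma getScore_def (c info : List Int) :
    getScore c info =
      (let p := scoreLoop 0 ((buildTemp c).reverse.zip info) 0 0
       if p.2 < p.1 then (p.1 - p.2, (buildTemp c).reverse) else (-2, [-1])) := rfl

lemma getScore_shape (c info : List Int) : keyShape (getScore c info) := by
  rw [getScore_def]
  simp only []
  split
  · right
    refine ⟨by omega, by simp [buildTemp_length]⟩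
  · left; rfl

lemma stepA_gen (st k : Int × List Int) (h1 : goodSt st) (h2 : keyShape k) :
    (if st.1 < k.1 then k
     else if k.1 = st.1 then (if tieLoop (st.2.reverse.zip k.2.reverse) then (st.1, k.2) else st)
     else st) = genStep st (some k) := by
  rw [genStep_some]
  by_cases hlt : st.1 < k.1
  · rw [if_pos hlt, if_pos ?_]
    simp only [ltb, Bool.or_eq_true, Bool.and_eq_true, decide_eq_true_eq]
    exact Or.inl hlt
  · rw [if_neg hlt]
    by_cases heq : k.1 = st.1
    · rw [if_pos heq]
      have hlen : st.2.length = k.2.length := by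
        rcases h1 with rfl | h1'
        · rcases h2 with rfl | ⟨h2a, _⟩
          · rfl
          · exfalso; simp at heq; omega
        · rcases h1' with rfl | ⟨h1a, h1b⟩
          · rcases h2 with rfl | ⟨h2a, _⟩
            · rfl
            · exfalso; simp at heq; omega
          · rcases h2 with rfl | ⟨_, h2b⟩
            · exfalso; simp at heq; omega
            · rw [h1b, h2b]
      rw [tieLoop_eq_listGT _ _ (by simp [hlen])]
      by_cases hgt : listGT k.2.reverse st.2.reverse = true
      · rw [if_pos hgt, if_pos ?_]
        · rw [← heq]
        · simp only [ltb, Bool.or_eq_true, Bool.and_eq_true, decide_eq_true_eq]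
          exact Or.inr ⟨heq.symm, hgt⟩
      · rw [if_neg hgt, if_neg ?_]
        simp only [ltb, Bool.or_eq_true, Bool.and_eq_true, decide_eq_true_eq]
        rintro (h | ⟨-, h⟩)
        · exact hlt h
        · exact hgt h
    · rw [if_neg heq, if_neg ?_]
      simp only [ltb, Bool.or_eq_true, Bool.and_eq_true, decide_eq_true_eq]
      rintro (h | ⟨h, -⟩)
      · exact hlt h
      · exact heq h.symm

lemma stepA_eq (info : List Int) (st : Int × List Int) (c : List Int)
    (h1 : goodSt st) :
    (let k := getScore c info
     if st.1 < k.1 then k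
     else if k.1 = st.1 then (if tieLoop (st.2.reverse.zip k.2.reverse) then (st.1, k.2) else st)
     else st) = genStep st (some (getScore c info)) :=
  stepA_gen st (getScore c info) h1 (getScore_shape c info)

lemma goodSt_genStep (st : Int × List Int) (k : Int × List Int) (h1 : goodSt st)
    (h2 : keyShape k) : goodSt (genStep st (some k)) := by
  rw [genStep_some]
  split
  · exact Or.inr h2
  · exact h1

lemma foldA_eq (info : List Int) :
    ∀ (l : List (List Int)) (st : Int × List Int), goodSt st →
      l.foldl (fun st lionInfo =>
        let k := getScore lionInfo info
        if st.1 < k.1 then k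
        else if k.1 = st.1 then (if tieLoop (st.2.reverse.zip k.2.reverse) then (st.1, k.2) else st)
        else st) st = gfold (fun c => some (getScore c info)) l st := by
  intro l
  induction l with
  | nil => intro st _; rfl
  | cons c rest ih =>
    intro st h
    rw [List.foldl_cons]
    have hstep := stepA_eq info st c h
    simp only [] at hstep ⊢
    rw [hstep]
    have hg : goodSt (genStep st (some (getScore c info))) :=
      goodSt_genStep st _ h (getScore_shape c info)
    rw [ih _ hg]
    rfl

-- ## scoring characterisation (sums over List.range)

def lterm (t info : List Int) (j : Nat) : Int :=
  if info.getD j 0 < t.getD j 0 then 10 - (j : Int) else 0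

def aterm (t info : List Int) (j : Nat) : Int :=
  if ¬(t.getD j 0 = 0 ∧ info.getD j 0 = 0) ∧ t.getD j 0 ≤ info.getD j 0 then 10 - (j : Int) else 0

lemma scoreLoop_eq : ∀ (u w : List Int) (i : Nat) (l a : Int),
    scoreLoop i (u.zip w) l a =
      (l + ((List.range (min u.length w.length)).map
              (fun j => if w.getD j 0 < u.getD j 0 then 10 - ((i + j : Nat) : Int) else 0)).sum,
       a + ((List.range (min u.length w.length)).map
              (fun j => if ¬(u.getD j 0 = 0 ∧ w.getD j 0 = 0) ∧ u.getD j 0 ≤ w.getD j 0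
                        then 10 - ((i + j : Nat) : Int) else 0)).sum) := by
  intro u
  induction u with
  | nil => intro w i l a; simp [scoreLoop]
  | cons x xs ih =>
    intro w i l a
    cases w with
    | nil => simp [scoreLoop]
    | cons y ys =>
      simp only [List.zip_cons_cons, scoreLoop]
      have hmin : min (x :: xs).length (y :: ys).length = min xs.length ys.length + 1 := by
        simp [List.length_cons, Nat.succ_min_succ]
      have hsum : ∀ g : Nat → Int,
          ((List.range (min xs.length ys.length + 1)).map g).sum
            = g 0 + ((List.range (min xs.length ys.length)).map (fun j => g (j + 1))).sum := by
        intro g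
        rw [List.range_succ_eq_map]
        simp [List.map_map, Function.comp_def, Nat.succ_eq_add_one]
      have hL : ((List.range (min (x :: xs).length (y :: ys).length)).map
            (fun j => if (y :: ys).getD j 0 < (x :: xs).getD j 0
                      then 10 - ((i + j : Nat) : Int) else 0)).sum
          = (if y < x then 10 - (i : Int) else 0)
            + ((List.range (min xs.length ys.length)).map
                (fun j => if ys.getD j 0 < xs.getD j 0
                          then 10 - ((i + 1 + j : Nat) : Int) else 0)).sum := by
        rw [hmin, hsum]
        simp only [List.getD_cons_zero, List.getD_cons_succ, Nat.add_zero]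
        congr 1
        apply congrArg
        apply List.map_congr_left
        intro j _
        rw [show i + (j + 1) = i + 1 + j from by omega]
      have hA : ((List.range (min (x :: xs).length (y :: ys).length)).map
            (fun j => if ¬((x :: xs).getD j 0 = 0 ∧ (y :: ys).getD j 0 = 0)
                        ∧ (x :: xs).getD j 0 ≤ (y :: ys).getD j 0
                      then 10 - ((i + j : Nat) : Int) else 0)).sum
          = (if ¬(x = 0 ∧ y = 0) ∧ x ≤ y then 10 - (i : Int) else 0)
            + ((List.range (min xs.length ys.length)).map
                (fun j => if ¬(xs.getD j 0 = 0 ∧ ys.getD j 0 = 0) ∧ xs.getD j 0 ≤ ys.getD j 0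
                          then 10 - ((i + 1 + j : Nat) : Int) else 0)).sum := by
        rw [hmin, hsum]
        simp only [List.getD_cons_zero, List.getD_cons_succ, Nat.add_zero]
        congr 1
        apply congrArg
        apply List.map_congr_left
        intro j _
        rw [show i + (j + 1) = i + 1 + j from by omega]
      rw [hL, hA]
      by_cases h1 : x = 0 ∧ y = 0
      · obtain ⟨rfl, rfl⟩ := h1
        rw [if_pos ⟨rfl, rfl⟩, ih ys (i + 1) l a]
        simp
      · rw [if_neg h1]
        by_cases h2 : y < x
        · rw [if_pos h2, ih ys (i + 1) (l + (10 - (i : Int))) a]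
          have hxy : ¬ x ≤ y := not_le.mpr h2
          simp only [Prod.mk.injEq, if_pos h2, if_neg (by tauto : ¬(¬(x = 0 ∧ y = 0) ∧ x ≤ y))]
          constructor
          · ring
          · ring
        · rw [if_neg h2, ih ys (i + 1) l (a + (10 - (i : Int)))]
          have hxy : x ≤ y := not_lt.mp h2
          simp only [Prod.mk.injEq, if_neg h2, if_pos (⟨h1, hxy⟩ : ¬(x = 0 ∧ y = 0) ∧ x ≤ y)]
          constructor
          · ring
          · ring

def LS (t info : List Int) : Int := ((List.range (min t.length info.length)).map (lterm t info)).sum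
def AS (t info : List Int) : Int := ((List.range (min t.length info.length)).map (aterm t info)).sum

lemma getScore_eq (c info : List Int) :
    getScore c info =
      (if AS (buildTemp c).reverse info < LS (buildTemp c).reverse info
       then (LS (buildTemp c).reverse info - AS (buildTemp c).reverse info, (buildTemp c).reverse)
       else (-2, [-1])) := by
  rw [getScore_def]
  simp only []
  rw [scoreLoop_eq]
  simp only [zero_add]
  rfl

-- ## counts

lemma foldl_set_getD : ∀ (c : List Int), (∀ x ∈ c, 0 ≤ x ∧ x < 11) →
    ∀ (acc : List Int), acc.length = 11 → ∀ j, j < 11 →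
    (c.foldl (fun t l => t.set l.toNat (t.getD l.toNat 0 + 1)) acc).getD j 0
      = acc.getD j 0 + (c.count (j : Int) : Int) := by
  intro c
  induction c with
  | nil => intro _ acc _ j _; simp
  | cons x xs ih =>
    intro hx acc hlen j hj
    rw [List.foldl_cons]
    obtain ⟨hx0, hx1⟩ := hx x (by simp)
    have hset_len : (acc.set x.toNat (acc.getD x.toNat 0 + 1)).length = 11 := by
      rw [List.length_set]; exact hlen
    rw [ih (fun y hy => hx y (List.mem_cons_of_mem _ hy)) _ hset_len j hj]
    have hjlt : j < acc.length := by omega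
    have hgetD : (acc.set x.toNat (acc.getD x.toNat 0 + 1)).getD j 0
        = if x.toNat = j then acc.getD j 0 + 1 else acc.getD j 0 := by
      rw [List.getD_eq_getElem _ _ (by rw [List.length_set]; exact hjlt), List.getElem_set]
      by_cases h : x.toNat = j
      · rw [if_pos h, if_pos h, h]
      · rw [if_neg h, if_neg h, List.getD_eq_getElem _ _ hjlt]
    rw [hgetD]
    by_cases hc : x = (j : Int)
    · rw [if_pos (by omega : x.toNat = j)]
      push_cast [List.count_cons, beq_iff_eq, hc]
      simp
      try omega
    · rw [if_neg (by omega : ¬ x.toNat = j)]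
      push_cast [List.count_cons, beq_iff_eq, hc]
      simp
      try omega

lemma buildTemp_getD (c : List Int) (hc : ∀ x ∈ c, 0 ≤ x ∧ x < 11) :
    ∀ j < 11, (buildTemp c).getD j 0 = (c.count (j : Int) : Int) := by
  intro j hj
  unfold buildTemp
  rw [foldl_set_getD c hc _ (by simp) j hj]
  have : (List.replicate 11 (0 : Int)).getD j 0 = 0 := by
    interval_cases j <;> rfl
  rw [this]
  ring

lemma sum_count_eq_length (c : List Int) (hc : ∀ x ∈ c, 0 ≤ x ∧ x < 11) :
    ((List.range 11).map (fun j => (c.count (j : Int) : Int))).sum = (c.length : Int) := by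
  induction c with
  | nil => simp
  | cons x xs ih =>
    obtain ⟨h0, h1⟩ := hc x (by simp)
    have ihx := ih (fun y hy => hc y (by simp [hy]))
    have hsplit : ((List.range 11).map (fun j => (((x :: xs).count (j : Int) : Nat) : Int))).sum
        = ((List.range 11).map (fun j =>
            ((xs.count (j : Int) : Nat) : Int) + (if x = (j : Int) then (1 : Int) else 0))).sum := by
      apply congrArg
      apply List.map_congr_left
      intro j _
      push_cast [List.count_cons, beq_iff_eq]
      by_cases h : x = (j : Int) <;> simp [h]
    rw [hsplit, PySem.List.sum_map_add_int, ihx]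
    have hind : ((List.range 11).map (fun j => if x = (j : Int) then (1 : Int) else 0)).sum = 1 := by
      interval_cases x <;> decide
    rw [hind]
    push_cast [List.length_cons]
    omega

-- ## cwr membership

lemma cwr_shape : ∀ (pool : List Int) (r : Nat) (c : List Int), c ∈ cwr pool r →
    c.length = r ∧ ∀ x ∈ c, x ∈ pool := by
  intro pool r
  induction pool, r using cwr.induct with
  | case1 pool =>
    intro c hc
    simp only [cwr, List.mem_singleton] at hc
    subst hc; simp
  | case2 r =>
    intro c hc
    simp [cwr] at hc
  | case3 x xs r ih1 ih2 =>
    intro c hc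
    rw [cwr] at hc
    rcases List.mem_append.mp hc with h | h
    · obtain ⟨c', hc', rfl⟩ := List.mem_map.mp h
      obtain ⟨hl, hm⟩ := ih1 c' hc'
      refine ⟨by simp [hl], ?_⟩
      intro y hy
      rcases List.mem_cons.mp hy with rfl | hy'
      · simp
      · exact hm y hy'
    · obtain ⟨hl, hm⟩ := ih2 c h
      exact ⟨hl, fun y hy => List.mem_cons_of_mem _ (hm y hy)⟩

lemma cwr_sub (x : Int) (xs : List Int) (r : Nat) (c : List Int) (h : c ∈ cwr xs r) :
    c ∈ cwr (x :: xs) r := by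
  cases r with
  | zero => simpa [cwr] using h
  | succ r =>
    rw [cwr]
    exact List.mem_append_right _ h

lemma cwr_of_counts : ∀ (pool : List Int) (ks : List Nat), ks.length = pool.length →
    ((pool.zip ks).flatMap (fun p => List.replicate p.2 p.1)) ∈ cwr pool ks.sum := by
  intro pool
  induction pool with
  | nil =>
    intro ks hk
    have : ks = [] := by cases ks <;> simp_all
    subst this
    simp [cwr]
  | cons x xs ih =>
    intro ks hk
    cases ks with
    | nil => simp at hk
    | cons k kt =>
      simp only [List.zip_cons_cons, List.flatMap_cons, List.sum_cons]
      have hrest := ih kt (by simpa using hk)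
      clear hk
      induction k with
      | zero => simpa using cwr_sub x xs kt.sum _ hrest
      | succ k ihk =>
        rw [show k + 1 + kt.sum = (k + kt.sum) + 1 from by omega, cwr]
        apply List.mem_append_left
        rw [show List.replicate (k + 1) x ++ (xs.zip kt).flatMap (fun p => List.replicate p.2 p.1)
              = x :: (List.replicate k x ++ (xs.zip kt).flatMap (fun p => List.replicate p.2 p.1))
            from by simp [List.replicate_succ]]
        exact List.mem_map.mpr ⟨_, ihk, rfl⟩

lemma count_fm_not_mem : ∀ (pool : List Int) (ks : List Nat) (x : Int), x ∉ pool →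
    ((pool.zip ks).flatMap (fun p => List.replicate p.2 p.1)).count x = 0 := by
  intro pool
  induction pool with
  | nil => intro ks x _; simp
  | cons y ys ih =>
    intro ks x hx
    cases ks with
    | nil => simp
    | cons k kt =>
      simp only [List.zip_cons_cons, List.flatMap_cons, List.count_append]
      simp only [List.mem_cons, not_or] at hx
      rw [ih kt x hx.2, List.count_replicate]
      simp [Ne.symm hx.1]

lemma count_fm_mem : ∀ (pool : List Int) (ks : List Nat) (j : Nat), pool.Nodup →
    ks.length = pool.length → j < pool.length →
    ((pool.zip ks).flatMap (fun p => List.replicate p.2 p.1)).count (pool.getD j 0) = ks.getD j 0 := by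
  intro pool
  induction pool with
  | nil => intro ks j _ _ h; simp at h
  | cons y ys ih =>
    intro ks j hnd hk hj
    cases ks with
    | nil => simp at hk
    | cons k kt =>
      simp only [List.zip_cons_cons, List.flatMap_cons, List.count_append]
      have hynotmem : y ∉ ys := (List.nodup_cons.mp hnd).1
      cases j with
      | zero =>
        simp only [List.getD_cons_zero]
        rw [List.count_replicate, count_fm_not_mem ys kt y hynotmem]
        simp
      | succ j =>
        simp only [List.getD_cons_succ]
        have hjlt : j < ys.length := by simpa using hj
        have hjy : ys.getD j 0 ≠ y := by
          intro h
          apply hynotmem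
          rw [← h, List.getD_eq_getElem _ _ hjlt]
          exact List.getElem_mem hjlt
        rw [List.count_replicate, ih kt j (List.nodup_cons.mp hnd).2 (by simpa using hk) hjlt]
        simp
        intro h
        exact absurd h.symm (by simpa [List.getD] using hjy)

-- ## B-side characterisation

def lB (mask : Nat) (j : Nat) : Int :=
  if mask.testBit j then 10 - (j : Int) else 0

def aB (counts : List Int) (mask : Nat) (j : Nat) : Int :=
  if ¬ mask.testBit j ∧ 0 < counts.getD j 0 then 10 - (j : Int) else 0

def cB (counts : List Int) (mask : Nat) (j : Nat) : Int :=
  if mask.testBit j then max (counts.getD j 0 + 1) 0 else 0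

-- lion points A's getScore additionally awards on targets B leaves unclaimed (negative counts)
def eB (counts : List Int) (mask : Nat) (j : Nat) : Int :=
  if ¬ mask.testBit j ∧ counts.getD j 0 < 0 then 10 - (j : Int) else 0

-- the shot count B records at slot j (k = number of listed targets)
def sB (counts : List Int) (mask : Nat) (k : Nat) (j : Nat) : Int :=
  if j < k ∧ mask.testBit j then max (counts.getD j 0 + 1) 0 else 0

lemma sum_range_shift (m : Nat) (g : Nat → Int) :
    ((List.range (m + 1)).map g).sum = g 0 + ((List.range m).map (fun r => g (r + 1))).sum := by
  rw [List.range_succ_eq_map]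
  simp [List.map_map, Function.comp_def, Nat.succ_eq_add_one]

lemma loopB_st (mask : Nat) : ∀ (cs : List Int) (j : Nat) (st : Int × Int × Int) (sh : List Int),
    (loopB mask j cs st sh).1 =
      (st.1 + ((List.range cs.length).map (fun r => lB mask (j + r))).sum,
       st.2.1 + ((List.range cs.length).map (fun r =>
         if ¬ mask.testBit (j + r) ∧ 0 < cs.getD r 0 then 10 - ((j + r : Nat) : Int) else 0)).sum,
       st.2.2 + ((List.range cs.length).map (fun r =>
         if mask.testBit (j + r) then max (cs.getD r 0 + 1) 0 else 0)).sum) := by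
  intro cs
  induction cs with
  | nil => intro j st sh; simp [loopB]
  | cons a rest ih =>
    intro j st sh
    obtain ⟨lion, apeach, cost⟩ := st
    rw [loopB]
    simp only [List.length_cons]
    rw [sum_range_shift rest.length (fun r => lB mask (j + r)),
        sum_range_shift rest.length (fun r =>
          if ¬ mask.testBit (j + r) ∧ 0 < (a :: rest).getD r 0 then 10 - ((j + r : Nat) : Int) else 0),
        sum_range_shift rest.length (fun r =>
          if mask.testBit (j + r) then max ((a :: rest).getD r 0 + 1) 0 else 0)]
    simp only [Nat.add_zero, List.getD_cons_zero, List.getD_cons_succ]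
    have e1 : ((List.range rest.length).map (fun r => lB mask (j + (r + 1)))).sum
        = ((List.range rest.length).map (fun r => lB mask (j + 1 + r))).sum := by
      apply congrArg; apply List.map_congr_left; intro r _
      rw [show j + (r + 1) = j + 1 + r from by omega]
    have e2 : ((List.range rest.length).map (fun r =>
          if ¬ mask.testBit (j + (r + 1)) ∧ 0 < rest.getD r 0
          then 10 - ((j + (r + 1) : Nat) : Int) else 0)).sum
        = ((List.range rest.length).map (fun r =>
          if ¬ mask.testBit (j + 1 + r) ∧ 0 < rest.getD r 0
          then 10 - ((j + 1 + r : Nat) : Int) else 0)).sum := by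
      apply congrArg; apply List.map_congr_left; intro r _
      rw [show j + (r + 1) = j + 1 + r from by omega]
    have e3 : ((List.range rest.length).map (fun r =>
          if mask.testBit (j + (r + 1)) then max (rest.getD r 0 + 1) 0 else 0)).sum
        = ((List.range rest.length).map (fun r =>
          if mask.testBit (j + 1 + r) then max (rest.getD r 0 + 1) 0 else 0)).sum := by
      apply congrArg; apply List.map_congr_left; intro r _
      rw [show j + (r + 1) = j + 1 + r from by omega]
    rw [e1, e2, e3]
    by_cases hb : mask.testBit j
    · rw [if_pos hb]
      rw [ih (j + 1) (lion + (10 - (j : Int)), apeach, cost + max (a + 1) 0)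
        (sh.set j (max (a + 1) 0))]
      have hl : lB mask j = 10 - (j : Int) := by unfold lB; rw [if_pos hb]
      rw [hl, if_neg (by rintro ⟨h, -⟩; exact h hb :
          ¬ (¬ mask.testBit j ∧ 0 < a)), if_pos hb]
      simp only [Prod.mk.injEq]
      refine ⟨by ring, by ring, by ring⟩
    · rw [if_neg hb]
      have hl : lB mask j = 0 := by unfold lB; rw [if_neg hb]
      rw [hl, if_neg hb]
      by_cases ha : 0 < a
      · rw [if_pos ha]
        rw [ih (j + 1) (lion, apeach + (10 - (j : Int)), cost) sh]
        rw [if_pos ⟨hb, ha⟩]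
        simp only [Prod.mk.injEq]
        refine ⟨by ring, by ring, by ring⟩
      · rw [if_neg ha]
        rw [ih (j + 1) (lion, apeach, cost) sh]
        rw [if_neg (by rintro ⟨-, h⟩; exact ha h : ¬ (¬ mask.testBit j ∧ 0 < a))]
        simp only [Prod.mk.injEq]
        refine ⟨by ring, by ring, by ring⟩

lemma loopB_sh_len (mask : Nat) : ∀ (cs : List Int) (j : Nat) (st : Int × Int × Int) (sh : List Int),
    ((loopB mask j cs st sh).2).length = sh.length := by
  intro cs
  induction cs with
  | nil => intro j st sh; rfl
  | cons a rest ih =>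
    intro j st sh
    obtain ⟨lion, apeach, cost⟩ := st
    rw [loopB]
    by_cases hb : mask.testBit j
    · rw [if_pos hb]
      simp only []
      rw [ih]
      exact List.length_set
    · rw [if_neg hb]
      by_cases ha : 0 < a
      · rw [if_pos ha, ih]
      · rw [if_neg ha, ih]

lemma getD_set_eq (l : List Int) (j : Nat) (v : Int) (i : Nat) :
    (l.set j v).getD i 0 = if j = i ∧ j < l.length then v else l.getD i 0 := by
  by_cases hi : i < l.length
  · rw [List.getD_eq_getElem _ _ (by rw [List.length_set]; exact hi), List.getElem_set,
      List.getD_eq_getElem _ _ hi]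
    by_cases h : j = i
    · rw [if_pos h, if_pos ⟨h, by omega⟩]
    · rw [if_neg h, if_neg (by rintro ⟨hh, -⟩; exact h hh)]
  · rw [List.getD_eq_default _ _ (by rw [List.length_set]; omega),
      List.getD_eq_default _ _ (by omega)]
    rw [if_neg (by rintro ⟨rfl, h⟩; omega)]

lemma loopB_sh_getD (mask : Nat) : ∀ (cs : List Int) (j : Nat) (st : Int × Int × Int)
    (sh : List Int) (i : Nat),
    ((loopB mask j cs st sh).2).getD i 0 =
      if j ≤ i ∧ i < j + cs.length ∧ mask.testBit i ∧ i < sh.length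
      then max (cs.getD (i - j) 0 + 1) 0
      else sh.getD i 0 := by
  intro cs
  induction cs with
  | nil =>
    intro j st sh i
    rw [if_neg (by rintro ⟨h1, h2, -⟩; simp at h2; omega)]
    rfl
  | cons a rest ih =>
    intro j st sh i
    obtain ⟨lion, apeach, cost⟩ := st
    rw [loopB]
    by_cases hb : mask.testBit j
    · rw [if_pos hb]
      simp only []
      rw [ih (j + 1) _ (sh.set j (max (a + 1) 0)) i]
      rw [List.length_set]
      by_cases hc : j + 1 ≤ i ∧ i < j + 1 + rest.length ∧ mask.testBit i ∧ i < sh.length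
      · rw [if_pos hc, if_pos ⟨by omega, by simp only [List.length_cons]; omega, hc.2.2⟩]
        rw [show i - j = (i - (j + 1)) + 1 from by omega, List.getD_cons_succ]
      · rw [if_neg hc, getD_set_eq]
        by_cases hj : j = i ∧ j < sh.length
        · rw [if_pos hj]
          rw [if_pos ⟨by omega, by simp only [List.length_cons]; omega, by rw [← hj.1]; exact hb,
            by omega⟩]
          rw [show i - j = 0 from by omega, List.getD_cons_zero]
        · rw [if_neg hj, if_neg ?_]
          rintro ⟨h1, h2, h3, h4⟩
          simp only [List.length_cons] at h2
          by_cases hij : i = j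
          · exact hj ⟨hij.symm, by omega⟩
          · exact hc ⟨by omega, by omega, h3, h4⟩
    · rw [if_neg hb]
      have htail : ∀ st' : Int × Int × Int,
          ((loopB mask (j + 1) rest st' sh).2).getD i 0 =
            if j ≤ i ∧ i < j + (a :: rest).length ∧ mask.testBit i ∧ i < sh.length
            then max ((a :: rest).getD (i - j) 0 + 1) 0
            else sh.getD i 0 := by
        intro st'
        rw [ih (j + 1) st' sh i]
        by_cases hc : j + 1 ≤ i ∧ i < j + 1 + rest.length ∧ mask.testBit i ∧ i < sh.length
        · rw [if_pos hc, if_pos ⟨by omega, by simp only [List.length_cons]; omega, hc.2.2⟩]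
          rw [show i - j = (i - (j + 1)) + 1 from by omega, List.getD_cons_succ]
        · rw [if_neg hc, if_neg ?_]
          rintro ⟨h1, h2, h3, h4⟩
          simp only [List.length_cons] at h2
          by_cases hij : i = j
          · rw [hij] at h3; exact hb h3
          · exact hc ⟨by omega, by omega, h3, h4⟩
      by_cases ha : 0 < a
      · rw [if_pos ha]; exact htail _
      · rw [if_neg ha]; exact htail _

def candB (n : Int) (counts : List Int) (mask : Nat) : Option (Int × List Int) :=
  let r := loopB mask 0 counts (0, 0, 0) (List.replicate 11 0)
  if n < r.1.2.2 ∨ r.1.1 - r.1.2.1 ≤ 0 then none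
  else some (r.1.1 - r.1.2.1, (r.2.set 10 (n - r.1.2.2)).reverse)

def flipSnd (p : Int × List Int) : Int × List Int := (p.1, p.2.reverse)

def toP (o : Option (Int × List Int)) : Int × List Int := o.getD ((-1 : Int), ([-1] : List Int))

lemma pairGT_iff (k best : Int × List Int) : pairGT k best = ltb (flipSnd best) (flipSnd k) := by
  unfold pairGT ltb flipSnd
  simp only [List.reverse_reverse]
  by_cases h : k.1 = best.1
  · simp [h]
  · have h2 : ¬ best.1 = k.1 := fun hh => h hh.symm
    simp [h, h2]

lemma stepB_flip (n : Int) (counts : List Int) (mask : Nat) (best : Option (Int × List Int)) :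
    flipSnd (toP (stepB n counts best mask))
      = genStep (flipSnd (toP best)) ((candB n counts mask).map flipSnd) := by
  unfold stepB candB
  simp only []
  set r := loopB mask 0 counts (0, 0, 0) (List.replicate 11 0) with hr
  by_cases hg : n < r.1.2.2 ∨ r.1.1 - r.1.2.1 ≤ 0
  · rw [if_pos hg, if_pos hg]
    rfl
  · rw [if_neg hg, if_neg hg]
    have hd : 0 < r.1.1 - r.1.2.1 := by push_neg at hg; omega
    set rv := (r.2.set 10 (n - r.1.2.2)).reverse with hrv
    cases best with
    | none =>
      rw [Option.map_some, genStep_some]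
      rw [if_pos ?_]
      · rfl
      · show ltb (flipSnd (toP none)) (flipSnd (r.1.1 - r.1.2.1, rv)) = true
        have : flipSnd (toP none) = ((-1 : Int), ([-1] : List Int)) := rfl
        rw [this]
        unfold ltb
        rw [Bool.or_eq_true]
        left
        exact decide_eq_true (by simp [flipSnd]; omega)
    | some b =>
      rw [Option.map_some, genStep_some, ← pairGT_iff]
      show flipSnd (toP (if pairGT (r.1.1 - r.1.2.1, rv) b = true
          then some (r.1.1 - r.1.2.1, rv) else some b))
        = if pairGT (r.1.1 - r.1.2.1, rv) b = true then flipSnd (r.1.1 - r.1.2.1, rv) else flipSnd b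
      by_cases hp : pairGT (r.1.1 - r.1.2.1, rv) b = true
      · rw [if_pos hp, if_pos hp]; rfl
      · rw [if_neg hp, if_neg hp]; rfl

lemma foldB_comm (n : Int) (counts : List Int) :
    ∀ (l : List Nat) (best : Option (Int × List Int)),
      flipSnd (toP (l.foldl (stepB n counts) best))
        = gfold (fun mask => (candB n counts mask).map flipSnd) l (flipSnd (toP best)) := by
  intro l
  induction l with
  | nil => intro best; rfl
  | cons mk rest ih =>
    intro best
    rw [List.foldl_cons, ih (stepB n counts best mk), stepB_flip]
    rfl


-- ## mask construction

def mkMask (p : Nat → Bool) : Nat → Nat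
  | 0 => 0
  | k + 1 => if p k then 2 ^ k + mkMask p k else mkMask p k

lemma mkMask_lt (p : Nat → Bool) : ∀ k, mkMask p k < 2 ^ k := by
  intro k
  induction k with
  | zero => simp [mkMask]
  | succ k ih =>
    rw [mkMask]
    have hpow : 2 ^ (k + 1) = 2 ^ k + 2 ^ k := by ring
    by_cases h : p k
    · rw [if_pos h]; omega
    · rw [if_neg h]; omega

lemma mkMask_testBit (p : Nat → Bool) : ∀ k j, (mkMask p k).testBit j = (decide (j < k) && p j) := by
  intro k
  induction k with
  | zero => intro j; simp [mkMask, Nat.zero_testBit]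
  | succ k ih =>
    intro j
    rw [mkMask]
    by_cases hp : p k
    · rw [if_pos hp]
      rcases Nat.lt_trichotomy j k with hj | rfl | hj
      · rw [Nat.testBit_two_pow_add_gt hj, ih j]
        simp [hj, show j < k + 1 by omega]
      · rw [Nat.testBit_two_pow_add_eq, ih _]
        simp [hp]
      · have hlt : 2 ^ k + mkMask p k < 2 ^ j := by
          have h1 := mkMask_lt p k
          have h2 : 2 ^ (k + 1) ≤ 2 ^ j := Nat.pow_le_pow_right (by norm_num) (by omega)
          have h3 : 2 ^ (k + 1) = 2 ^ k + 2 ^ k := by ring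
          omega
        rw [Nat.testBit_lt_two_pow hlt]
        simp [show ¬ j < k + 1 by omega]
    · rw [if_neg hp, ih j]
      rcases Nat.lt_trichotomy j k with hj | rfl | hj
      · simp [hj, show j < k + 1 by omega]
      · simp [hp]
      · simp [show ¬ j < k by omega, show ¬ j < k + 1 by omega]

-- ## sum helpers

lemma sum_range_extend (g : Nat → Int) (a b : Nat) (hab : a ≤ b)
    (h0 : ∀ j, a ≤ j → j < b → g j = 0) :
    ((List.range b).map g).sum = ((List.range a).map g).sum := by
  have hb : b = a + (b - a) := by omega
  rw [hb, List.range_add, List.map_append, List.sum_append]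
  have h2 : (((List.range (b - a)).map (a + ·)).map g).sum = 0 := by
    apply List.sum_eq_zero
    intro x hx
    simp only [List.map_map, List.mem_map, Function.comp, List.mem_range] at hx
    obtain ⟨j, hj, rfl⟩ := hx
    exact h0 _ (by omega) (by omega)
  rw [h2, add_zero]

lemma eq_of_sum_eq_of_le (f g : Nat → Int) :
    ∀ (b : Nat), (∀ j < b, f j ≤ g j) →
      ((List.range b).map f).sum = ((List.range b).map g).sum → ∀ j < b, f j = g j := by
  intro b
  induction b with
  | zero => intro _ _ j hj; omega
  | succ b ih =>
    intro hle hsum j hj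
    have hsb : ((List.range b).map f).sum ≤ ((List.range b).map g).sum :=
      List.sum_le_sum (fun i hi => hle i (by simp only [List.mem_range] at hi; omega))
    have hfb : f b ≤ g b := hle b (by omega)
    rw [List.range_succ, List.map_append, List.sum_append, List.map_append, List.sum_append] at hsum
    simp only [List.map_cons, List.map_nil, List.sum_cons, List.sum_nil, add_zero] at hsum
    have h1 : ((List.range b).map f).sum = ((List.range b).map g).sum := by omega
    have h2 : f b = g b := by omega
    rcases Nat.lt_succ_iff_lt_or_eq.mp hj with hj' | rfl
    · exact ih (fun i hi => hle i (by omega)) h1 j hj'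
    · exact h2


-- ## the two directions

def score : List Int := [10, 9, 8, 7, 6, 5, 4, 3, 2, 1, 0]

-- A's scoring sums truncate to the first k = min 10 len slots (the j = 10 slot is worth 0)
lemma LS_trunc (info t : List Int) (k : Nat) (hk : k = min 10 info.length) (ht : t.length = 11) :
    LS t info = ((List.range k).map (lterm t info)).sum ∧
    AS t info = ((List.range k).map (aterm t info)).sum := by
  have hmm : k ≤ min t.length info.length := by rw [ht]; omega
  have h10 : ∀ j, k ≤ j → j < min t.length info.length → j = 10 := by
    intro j h1 h2
    rw [ht] at h2
    omega
  constructor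
  · unfold LS
    apply sum_range_extend _ _ _ hmm
    intro j hj1 hj2
    have hj := h10 j hj1 hj2
    subst hj
    unfold lterm
    split <;> norm_num
  · unfold AS
    apply sum_range_extend _ _ _ hmm
    intro j hj1 hj2
    have hj := h10 j hj1 hj2
    subst hj
    unfold aterm
    split <;> norm_num

lemma getD_take10 (info : List Int) (j : Nat) (hj : j < 10) :
    (info.take 10).getD j 0 = info.getD j 0 := by
  by_cases h : j < info.length
  · rw [List.getD_eq_getElem _ _ (by rw [List.length_take]; omega),
      List.getD_eq_getElem _ _ h, List.getElem_take]
  · rw [List.getD_eq_default _ _ (by rw [List.length_take]; omega),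
      List.getD_eq_default _ _ (by omega)]

lemma loopB_st0 (counts : List Int) (mask : Nat) :
    (loopB mask 0 counts (0, 0, 0) (List.replicate 11 0)).1 =
      (((List.range counts.length).map (lB mask)).sum,
       ((List.range counts.length).map (aB counts mask)).sum,
       ((List.range counts.length).map (cB counts mask)).sum) := by
  rw [loopB_st]
  simp only [Nat.zero_add, zero_add]
  rfl

lemma candB_eq (n : Int) (counts : List Int) (mask : Nat) :
    candB n counts mask =
      (if n < ((List.range counts.length).map (cB counts mask)).sum
          ∨ ((List.range counts.length).map (lB mask)).sum
            - ((List.range counts.length).map (aB counts mask)).sum ≤ 0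
       then none
       else some (((List.range counts.length).map (lB mask)).sum
            - ((List.range counts.length).map (aB counts mask)).sum,
         (((loopB mask 0 counts (0, 0, 0) (List.replicate 11 0)).2).set 10
           (n - ((List.range counts.length).map (cB counts mask)).sum)).reverse)) := by
  unfold candB
  simp only [loopB_st0]

lemma SH_len (counts : List Int) (mask : Nat) :
    ((loopB mask 0 counts (0, 0, 0) (List.replicate 11 0)).2).length = 11 := by
  rw [loopB_sh_len, List.length_replicate]

lemma SH_getD (counts : List Int) (mask : Nat) (hk : counts.length ≤ 10) (i : Nat) :
    ((loopB mask 0 counts (0, 0, 0) (List.replicate 11 0)).2).getD i 0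
      = sB counts mask counts.length i := by
  rw [loopB_sh_getD]
  have hrep : (List.replicate 11 (0 : Int)).getD i 0 = 0 := by
    by_cases hi : i < 11
    · rw [List.getD_eq_getElem _ _ (by rw [List.length_replicate]; omega)]
      rw [List.getElem_replicate]
    · rw [List.getD_eq_default _ _ (by rw [List.length_replicate]; omega)]
  unfold sB
  by_cases hc : i < counts.length ∧ mask.testBit i
  · rw [if_pos ⟨Nat.zero_le i, by omega, hc.2, by rw [List.length_replicate]; omega⟩, if_pos hc,
      Nat.sub_zero]
  · rw [if_neg ?_, if_neg hc, hrep]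
    rintro ⟨-, h2, h3, -⟩
    exact hc ⟨by omega, h3⟩

lemma sB_sum (counts : List Int) (mask : Nat) (k : Nat) (hk : k ≤ 10) :
    ((List.range 10).map (sB counts mask k)).sum
      = ((List.range k).map (cB counts mask)).sum := by
  have hx : ((List.range 10).map (sB counts mask k)).sum
      = ((List.range k).map (sB counts mask k)).sum := by
    apply sum_range_extend _ _ _ hk
    intro j hj1 hj2
    unfold sB
    rw [if_neg (by rintro ⟨h, -⟩; omega)]
  rw [hx]
  apply congrArg
  apply List.map_congr_left
  intro j hj
  simp only [List.mem_range] at hj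
  unfold sB cB
  by_cases hb : mask.testBit j
  · rw [if_pos ⟨hj, hb⟩, if_pos hb]
  · rw [if_neg (by rintro ⟨-, h⟩; exact hb h), if_neg hb]

lemma sB_nonneg (counts : List Int) (mask : Nat) (k : Nat) (j : Nat) :
    0 ≤ sB counts mask k j := by
  unfold sB
  split
  · exact le_max_right _ _
  · exact le_refl 0

lemma getD_map_toNat (l : List Int) (n : Nat) :
    (l.map Int.toNat).getD n 0 = (l.getD n 0).toNat := by
  by_cases h : n < l.length
  · rw [List.getD_eq_getElem _ _ (by simpa using h), List.getElem_map,
      List.getD_eq_getElem _ _ h]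
  · rw [List.getD_eq_default _ _ (by simpa using (not_lt.mp h)),
      List.getD_eq_default _ _ (not_lt.mp h)]
    rfl

lemma sum_toNat : ∀ (l : List Int), (∀ x ∈ l, 0 ≤ x) → ((l.map Int.toNat).sum : Int) = l.sum := by
  intro l
  induction l with
  | nil => intro _; simp
  | cons x xs ih =>
    intro h
    have hx := h x (by simp)
    have ihs := ih (fun y hy => h y (by simp [hy]))
    simp only [List.map_cons, List.sum_cons]
    omega

lemma getD_range_sum : ∀ (l : List Int),
    ((List.range l.length).map (fun j => l.getD j 0)).sum = l.sum := by
  intro l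
  induction l with
  | nil => simp
  | cons x xs ih =>
    simp only [List.length_cons, List.range_succ_eq_map, List.map_cons, List.sum_cons,
      List.getD_cons_zero, List.map_map]
    rw [show ((fun j => (x :: xs).getD j 0) ∘ Nat.succ) = (fun j => xs.getD j 0) from
      funext (fun j => by simp [Nat.succ_eq_add_one, List.getD_cons_succ])]
    rw [ih]


-- every B candidate equals, or is beaten by, the score of some combination
lemma realize (n : Int) (info : List Int) (mask : Nat) (kd : Int × List Int)
    (h : candB n (info.take 10) mask = some kd) :
    ∃ c ∈ cwr score n.toNat,
      (flipSnd kd = getScore c info ∨ ltb (flipSnd kd) (getScore c info) = true) := by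
  set counts := info.take 10 with hcounts
  set k := counts.length with hkdef
  have hk : k = min 10 info.length := by rw [hkdef, hcounts, List.length_take]
  have hk10 : k ≤ 10 := by omega
  rw [candB_eq] at h
  set SH := (loopB mask 0 counts (0, 0, 0) (List.replicate 11 0)).2 with hSHdef
  set L := ((List.range k).map (lB mask)).sum with hLdef
  set A := ((List.range k).map (aB counts mask)).sum with hAdef
  set C := ((List.range k).map (cB counts mask)).sum with hCdef
  by_cases hg : n < C ∨ L - A ≤ 0
  · rw [if_pos hg] at h; simp at h
  rw [if_neg hg] at h
  push_neg at hg
  obtain ⟨hC, hd⟩ := hg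
  have hkd := Option.some.inj h
  set w := SH.set 10 (n - C) with hwdef
  have hSH_len : SH.length = 11 := SH_len counts mask
  have hSH_getD : ∀ i, SH.getD i 0 = sB counts mask k i := fun i => SH_getD counts mask hk10 i
  have hw_len : w.length = 11 := by rw [hwdef, List.length_set, hSH_len]
  have hw_10 : w.getD 10 0 = n - C := by
    rw [hwdef, getD_set_eq, if_pos ⟨rfl, by rw [hSH_len]; omega⟩]
  have hw_getD : ∀ j, j < 10 → w.getD j 0 = sB counts mask k j := by
    intro j hj
    rw [hwdef, getD_set_eq, if_neg (by rintro ⟨h10, -⟩; omega), hSH_getD]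
  have hw_pos : ∀ j, j < 11 → 0 ≤ w.getD j 0 := by
    intro j hj
    by_cases hj10 : j < 10
    · rw [hw_getD j hj10]; exact sB_nonneg counts mask k j
    · rw [show j = 10 from by omega, hw_10]; omega
  have hsB_sum : ((List.range 10).map (sB counts mask k)).sum = C := sB_sum counts mask k hk10
  have hw_sum : w.sum = n := by
    have h1 : ((List.range w.length).map (fun j => w.getD j 0)).sum = w.sum := getD_range_sum w
    rw [hw_len] at h1
    rw [← h1, show (11 : Nat) = 10 + 1 from rfl, List.range_succ, List.map_append, List.sum_append]
    simp only [List.map_cons, List.map_nil, List.sum_cons, List.sum_nil, add_zero]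
    rw [hw_10]
    have h2 : ((List.range 10).map (fun j => w.getD j 0)).sum = C := by
      rw [← hsB_sum]
      apply congrArg
      apply List.map_congr_left
      intro j hj
      simp only [List.mem_range] at hj
      exact hw_getD j hj
    rw [h2]
    ring
  have hw_nonneg : ∀ x ∈ w, 0 ≤ x := by
    intro x hx
    obtain ⟨i, hi, hget⟩ := List.mem_iff_getElem.mp hx
    have hp := hw_pos i (by rw [hw_len] at hi; exact hi)
    rw [List.getD_eq_getElem _ _ hi] at hp
    rwa [hget] at hp
  set ks := w.map Int.toNat with hks
  have hks_len : ks.length = 11 := by simp [hks, hw_len]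
  have hks_sum : ks.sum = n.toNat := by
    have h1 : ((ks.sum : Nat) : Int) = w.sum := sum_toNat w hw_nonneg
    have hn : 0 ≤ n := by
      rw [← hw_sum]
      exact List.sum_nonneg hw_nonneg
    omega
  have hscore_len : score.length = 11 := rfl
  have hc0 : ((score.zip ks).flatMap (fun p => List.replicate p.2 p.1)) ∈ cwr score n.toNat := by
    have := cwr_of_counts score ks (by rw [hks_len, hscore_len])
    rwa [hks_sum] at this
  set c0 := (score.zip ks).flatMap (fun p => List.replicate p.2 p.1) with hc0def
  have hmem0 : ∀ x ∈ c0, 0 ≤ x ∧ x < 11 := by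
    intro x hx
    have hxs := (cwr_shape _ _ _ hc0).2 x hx
    simp [score] at hxs
    omega
  have hbl : (buildTemp c0).length = 11 := buildTemp_length c0
  have hbt : ∀ j, j < 11 → (buildTemp c0).getD j 0 = ((ks.getD (10 - j) 0 : Nat) : Int) := by
    intro j hj
    rw [buildTemp_getD c0 hmem0 j hj]
    have hsc : score.getD (10 - j) 0 = (j : Int) := by interval_cases j <;> rfl
    rw [← hsc, count_fm_mem score ks (10 - j) (by decide) (by rw [hks_len, hscore_len])
      (by rw [hscore_len]; omega)]
  have hrev_getD : ∀ i, i < 11 → ((buildTemp c0).reverse).getD i 0 = w.getD i 0 := by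
    intro i hi
    rw [List.getD_eq_getElem _ _ (by rw [List.length_reverse, hbl]; omega), List.getElem_reverse]
    rw [← List.getD_eq_getElem (buildTemp c0) 0 (by rw [hbl]; omega :
      (buildTemp c0).length - 1 - i < (buildTemp c0).length)]
    rw [show (buildTemp c0).length - 1 - i = 10 - i from by rw [hbl]]
    rw [hbt (10 - i) (by omega), show 10 - (10 - i) = i from by omega]
    rw [hks, getD_map_toNat w i]
    have := hw_pos i hi
    omega
  have ht_eq_w : (buildTemp c0).reverse = w := by
    apply List.ext_getElem (by rw [List.length_reverse, hbl, hw_len])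
    intro i h1 h2
    have hi : i < 11 := by rw [List.length_reverse, hbl] at h1; exact h1
    rw [← List.getD_eq_getElem ((buildTemp c0).reverse) 0 h1, ← List.getD_eq_getElem w 0 h2]
    exact hrev_getD i hi
  refine ⟨c0, hc0, ?_⟩
  have hinfo_c : ∀ j, j < k → info.getD j 0 = counts.getD j 0 := by
    intro j hj
    rw [hcounts]
    exact (getD_take10 info j (by omega)).symm
  obtain ⟨hLSt, hASt⟩ := LS_trunc info w k hk hw_len
  set E := ((List.range k).map (eB counts mask)).sum with hEdef
  have hE : 0 ≤ E := by
    rw [hEdef]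
    apply List.sum_nonneg
    intro x hx
    obtain ⟨j, hj, rfl⟩ := List.mem_map.mp hx
    simp only [List.mem_range] at hj
    unfold eB
    split
    · have hj10 : (j : Int) ≤ 10 := by exact_mod_cast (by omega : j ≤ 10)
      omega
    · exact le_refl 0
  have hLSw : LS w info = L + E := by
    rw [hLSt, hLdef, hEdef]
    have hcongr : ∀ j ∈ List.range k, lterm w info j = lB mask j + eB counts mask j := by
      intro j hj
      simp only [List.mem_range] at hj
      have hj10 : j < 10 := by omega
      unfold lterm lB eB
      rw [hw_getD j hj10, hinfo_c j hj]
      unfold sB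
      by_cases hb : mask.testBit j
      · rw [if_pos (show j < k ∧ mask.testBit j from ⟨hj, hb⟩),
          if_pos (show counts.getD j 0 < max (counts.getD j 0 + 1) 0 from by omega),
          if_pos (show mask.testBit j = true from hb),
          if_neg (show ¬ (¬ mask.testBit j ∧ counts.getD j 0 < 0) from by
            rintro ⟨hh, -⟩; exact hh hb)]
        ring
      · rw [if_neg (show ¬ (j < k ∧ mask.testBit j) from by rintro ⟨-, hh⟩; exact hb hh),
          if_neg (show ¬ mask.testBit j = true from hb)]
        by_cases hcn : counts.getD j 0 < 0
        · rw [if_pos (show counts.getD j 0 < 0 from hcn),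
            if_pos (show ¬ mask.testBit j ∧ counts.getD j 0 < 0 from ⟨hb, hcn⟩)]
          ring
        · rw [if_neg (show ¬ counts.getD j 0 < 0 from hcn),
            if_neg (show ¬ (¬ mask.testBit j ∧ counts.getD j 0 < 0) from by
              rintro ⟨-, hh⟩; exact hcn hh)]
          ring
    rw [List.map_congr_left hcongr, PySem.List.sum_map_add_int]
  have hASw : AS w info = A := by
    rw [hASt, hAdef]
    apply congrArg
    apply List.map_congr_left
    intro j hj
    simp only [List.mem_range] at hj
    have hj10 : j < 10 := by omega
    unfold aterm aB
    rw [hw_getD j hj10, hinfo_c j hj]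
    unfold sB
    by_cases hb : mask.testBit j
    · rw [if_pos (show j < k ∧ mask.testBit j from ⟨hj, hb⟩),
        if_neg (show ¬ (¬ (max (counts.getD j 0 + 1) 0 = 0 ∧ counts.getD j 0 = 0)
            ∧ max (counts.getD j 0 + 1) 0 ≤ counts.getD j 0) from by
          rintro ⟨-, hle⟩; omega),
        if_neg (show ¬ (¬ mask.testBit j ∧ 0 < counts.getD j 0) from by
          rintro ⟨hh, -⟩; exact hh hb)]
    · rw [if_neg (show ¬ (j < k ∧ mask.testBit j) from by rintro ⟨-, hh⟩; exact hb hh)]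
      by_cases hc0p : 0 < counts.getD j 0
      · rw [if_pos (show ¬ ((0 : Int) = 0 ∧ counts.getD j 0 = 0) ∧ (0 : Int) ≤ counts.getD j 0
            from ⟨by rintro ⟨-, hh⟩; omega, by omega⟩),
          if_pos (show ¬ mask.testBit j ∧ 0 < counts.getD j 0 from ⟨hb, hc0p⟩)]
      · rw [if_neg (show ¬ (¬ ((0 : Int) = 0 ∧ counts.getD j 0 = 0) ∧ (0 : Int) ≤ counts.getD j 0)
            from by rintro ⟨hne, hle⟩; exact hne ⟨rfl, by omega⟩),
          if_neg (show ¬ (¬ mask.testBit j ∧ 0 < counts.getD j 0) from by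
            rintro ⟨-, hh⟩; exact hc0p hh)]
  rw [getScore_eq, ht_eq_w, hLSw, hASw, if_pos (by omega : A < L + E)]
  have hflip : flipSnd kd = (L - A, w) := by
    rw [← hkd]
    simp [flipSnd]
  by_cases hE0 : E = 0
  · left
    rw [hflip, hE0]
    norm_num
  · right
    rw [hflip]
    simp only [ltb, Bool.or_eq_true, Bool.and_eq_true, decide_eq_true_eq]
    left
    omega

-- every winning combination equals, or is beaten by, some B candidate
lemma dominate (n : Int) (info : List Int) (hn : 0 ≤ n) (c : List Int)
    (hc : c ∈ cwr score n.toNat) (d : Int) (t : List Int) (hgs : getScore c info = (d, t))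
    (hd : 1 ≤ d) :
    ∃ mask < 2 ^ (info.take 10).length, ∃ kd, candB n (info.take 10) mask = some kd ∧
      ((d, t) = flipSnd kd ∨ ltb (d, t) (flipSnd kd) = true) := by
  set counts := info.take 10 with hcounts
  set k := counts.length with hkdef
  have hk : k = min 10 info.length := by rw [hkdef, hcounts, List.length_take]
  have hk10 : k ≤ 10 := by omega
  obtain ⟨hclen, helem⟩ := cwr_shape _ _ _ hc
  have hmem : ∀ x ∈ c, 0 ≤ x ∧ x < 11 := by
    intro x hx
    have := helem x hx
    simp [score] at this
    omega
  rw [getScore_eq] at hgs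
  by_cases hAL : AS (buildTemp c).reverse info < LS (buildTemp c).reverse info
  case neg =>
    rw [if_neg hAL] at hgs
    exfalso
    have : (-2 : Int) = d := congrArg Prod.fst hgs
    omega
  rw [if_pos hAL] at hgs
  have hd_eq : d = LS (buildTemp c).reverse info - AS (buildTemp c).reverse info :=
    (congrArg Prod.fst hgs).symm
  have ht_eq : t = (buildTemp c).reverse := (congrArg Prod.snd hgs).symm
  subst ht_eq
  set t := (buildTemp c).reverse with htdef
  have hbl : (buildTemp c).length = 11 := buildTemp_length c
  have ht : t.length = 11 := by rw [htdef, List.length_reverse, hbl]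
  have htj : ∀ j, j < 11 → t.getD j 0 = ((c.count (((10 - j : Nat) : Nat) : Int) : Nat) : Int) := by
    intro j hj
    rw [htdef]
    rw [List.getD_eq_getElem _ _ (by rw [List.length_reverse, hbl]; omega), List.getElem_reverse]
    rw [← List.getD_eq_getElem (buildTemp c) 0 (by rw [hbl]; omega :
      (buildTemp c).length - 1 - j < (buildTemp c).length)]
    rw [show (buildTemp c).length - 1 - j = 10 - j from by rw [hbl]]
    rw [buildTemp_getD c hmem (10 - j) (by omega)]
  have hpos : ∀ j, j < 11 → 0 ≤ t.getD j 0 := by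
    intro j hj
    rw [htj j hj]
    exact Int.natCast_nonneg _
  have hsum : ((List.range 11).map (fun j => t.getD j 0)).sum = n := by
    have h1 : ((List.range t.length).map (fun j => t.getD j 0)).sum = t.sum := getD_range_sum t
    rw [ht] at h1
    rw [h1, htdef, List.sum_reverse]
    have h2 : ((List.range (buildTemp c).length).map (fun j => (buildTemp c).getD j 0)).sum
        = (buildTemp c).sum := getD_range_sum _
    rw [hbl] at h2
    rw [← h2]
    have h3 : ((List.range 11).map (fun j => (buildTemp c).getD j 0)).sum = (c.length : Int) := by
      rw [show ((List.range 11).map (fun j => (buildTemp c).getD j 0))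
          = ((List.range 11).map (fun j => (c.count (j : Int) : Int))) from
        List.map_congr_left (fun j hj => buildTemp_getD c hmem j (by simpa using hj))]
      exact sum_count_eq_length c hmem
    rw [h3, hclen]
    omega
  set p : Nat → Bool := fun j => decide (counts.getD j 0 < t.getD j 0) with hp
  set mask := mkMask p k with hmask
  have hmasklt : mask < 2 ^ k := mkMask_lt p k
  have hS : ∀ j, j < k → (mask.testBit j = true ↔ counts.getD j 0 < t.getD j 0) := by
    intro j hj
    rw [hmask, mkMask_testBit p k j, hp]
    simp [hj]
  have hinfo_c : ∀ j, j < k → info.getD j 0 = counts.getD j 0 := by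
    intro j hj
    rw [hcounts]
    exact (getD_take10 info j (by omega)).symm
  obtain ⟨hLSt, hASt⟩ := LS_trunc info t k hk ht
  have hLeq : LS t info = ((List.range k).map (lB mask)).sum := by
    rw [hLSt]
    apply congrArg
    apply List.map_congr_left
    intro j hj
    simp only [List.mem_range] at hj
    unfold lterm lB
    rw [hinfo_c j hj]
    by_cases hb : mask.testBit j
    · rw [if_pos ((hS j hj).mp hb), if_pos hb]
    · rw [if_neg (fun hlt => hb ((hS j hj).mpr hlt)), if_neg hb]
  have hAeq : AS t info = ((List.range k).map (aB counts mask)).sum := by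
    rw [hASt]
    apply congrArg
    apply List.map_congr_left
    intro j hj
    simp only [List.mem_range] at hj
    have hpj := hpos j (by omega)
    have hSj := hS j hj
    unfold aterm aB
    rw [hinfo_c j hj]
    by_cases hb : mask.testBit j
    · have := hSj.mp hb
      rw [if_neg (by rintro ⟨-, hle⟩; omega), if_neg (by rintro ⟨hh, -⟩; exact hh hb)]
    · have hle : t.getD j 0 ≤ counts.getD j 0 := by
        by_contra hx
        exact hb (hSj.mpr (by omega))
      by_cases hc0p : 0 < counts.getD j 0
      · rw [if_pos ⟨by rintro ⟨-, hh⟩; omega, hle⟩, if_pos ⟨hb, hc0p⟩]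
      · rw [if_neg (by rintro ⟨hne, -⟩; exact hne ⟨by omega, by omega⟩),
          if_neg (by rintro ⟨-, hh⟩; exact hc0p hh)]
  set L := ((List.range k).map (lB mask)).sum with hLdef
  set A := ((List.range k).map (aB counts mask)).sum with hAdef
  set C := ((List.range k).map (cB counts mask)).sum with hCdef
  have hdLA : d = L - A := by rw [hd_eq, hLeq, hAeq]
  have hcb_le : ∀ j, j < 10 → sB counts mask k j ≤ t.getD j 0 := by
    intro j hj
    unfold sB
    by_cases hcnd : j < k ∧ mask.testBit j
    · rw [if_pos hcnd]
      have h1 := (hS j hcnd.1).mp hcnd.2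
      have h2 := hpos j (by omega)
      omega
    · rw [if_neg hcnd]
      exact hpos j (by omega)
  have hsB_sum : ((List.range 10).map (sB counts mask k)).sum = C := sB_sum counts mask k hk10
  have hsum10 : ((List.range 10).map (fun j => t.getD j 0)).sum = n - t.getD 10 0 := by
    have hx := hsum
    rw [show (11 : Nat) = 10 + 1 from rfl, List.range_succ, List.map_append, List.sum_append] at hx
    simp only [List.map_cons, List.map_nil, List.sum_cons, List.sum_nil, add_zero] at hx
    omega
  have hCle : C ≤ n - t.getD 10 0 := by
    rw [← hsB_sum, ← hsum10]
    exact List.sum_le_sum (fun j hj => hcb_le j (by simp only [List.mem_range] at hj; omega))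
  have ht10 : 0 ≤ t.getD 10 0 := hpos 10 (by omega)
  have hguard : ¬ (n < C ∨ L - A ≤ 0) := by
    push_neg
    exact ⟨by omega, by omega⟩
  set SH := (loopB mask 0 counts (0, 0, 0) (List.replicate 11 0)).2 with hSHdef
  have hSH_len : SH.length = 11 := SH_len counts mask
  have hSH_getD : ∀ i, SH.getD i 0 = sB counts mask k i := fun i => SH_getD counts mask hk10 i
  set w := SH.set 10 (n - C) with hwdef
  have hw_len : w.length = 11 := by rw [hwdef, List.length_set, hSH_len]
  have hw_10 : w.getD 10 0 = n - C := by
    rw [hwdef, getD_set_eq, if_pos ⟨rfl, by rw [hSH_len]; omega⟩]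
  have hw_getD : ∀ j, j < 10 → w.getD j 0 = sB counts mask k j := by
    intro j hj
    rw [hwdef, getD_set_eq, if_neg (by rintro ⟨h10, -⟩; omega), hSH_getD]
  have hcand : candB n counts mask = some (L - A, w.reverse) := by
    rw [candB_eq, ← hkdef, ← hLdef, ← hAdef, ← hCdef, if_neg hguard, ← hSHdef, ← hwdef]
  refine ⟨mask, hmasklt, (L - A, w.reverse), hcand, ?_⟩
  have hfl : flipSnd (L - A, w.reverse) = (L - A, w) := by
    simp [flipSnd]
  rw [hfl, hdLA]
  by_cases heq : t = w
  · left
    rw [heq]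
  · right
    have hne10 : t.getD 10 0 ≠ n - C := by
      intro h10
      apply heq
      have hsum_eq : ((List.range 10).map (sB counts mask k)).sum
          = ((List.range 10).map (fun j => t.getD j 0)).sum := by
        rw [hsB_sum, hsum10]
        omega
      have hpt := eq_of_sum_eq_of_le _ _ 10 (fun j hj => hcb_le j hj) hsum_eq
      apply List.ext_getElem (by rw [ht, hw_len])
      intro i h1 h2
      have hi : i < 11 := by rw [ht] at h1; exact h1
      rw [← List.getD_eq_getElem t 0 h1, ← List.getD_eq_getElem w 0 h2]
      by_cases hi10 : i < 10
      · rw [hw_getD i hi10]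
        exact (hpt i hi10).symm
      · rw [show i = 10 from by omega, hw_10, h10]
    have hlt10 : t.getD 10 0 < n - C := by omega
    have hwne : w ≠ [] := by
      intro hh
      rw [hh] at hw_len
      simp at hw_len
    have hwrev : w.reverse = (n - C) :: w.dropLast.reverse := by
      conv_lhs => rw [show w = w.dropLast ++ [w.getLast hwne] from
        (List.dropLast_append_getLast hwne).symm]
      rw [List.reverse_concat]
      congr 1
      rw [List.getLast_eq_getElem hwne, ← List.getD_eq_getElem w 0 (by omega :
        w.length - 1 < w.length)]
      rw [show w.length - 1 = 10 from by rw [hw_len], hw_10]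
    have htne : t ≠ [] := by
      intro hh
      rw [hh] at ht
      simp at ht
    have htrev : t.reverse = t.getD 10 0 :: t.dropLast.reverse := by
      conv_lhs => rw [show t = t.dropLast ++ [t.getLast htne] from
        (List.dropLast_append_getLast htne).symm]
      rw [List.reverse_concat]
      congr 1
      rw [List.getLast_eq_getElem htne, ← List.getD_eq_getElem t 0 (by omega :
        t.length - 1 < t.length)]
      rw [show t.length - 1 = 10 from by rw [ht]]
    unfold ltb
    simp only [lt_self_iff_false, decide_false, decide_true, Bool.false_or, Bool.true_and,
      Bool.or_eq_true]
    rw [hwrev, htrev, listGT]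
    rw [if_neg (by omega : ¬ (n - C) = t.getD 10 0)]
    exact decide_eq_true hlt10

lemma candB_fst (n : Int) (counts : List Int) (mask : Nat) (kd : Int × List Int)
    (h : candB n counts mask = some kd) : 1 ≤ kd.1 := by
  rw [candB_eq] at h
  by_cases hg : n < ((List.range counts.length).map (cB counts mask)).sum
      ∨ ((List.range counts.length).map (lB mask)).sum
        - ((List.range counts.length).map (aB counts mask)).sum ≤ 0
  · rw [if_pos hg] at h; simp at h
  · rw [if_neg hg] at h
    have hkk := Option.some.inj h
    push_neg at hg
    rw [← hkk]
    simp only []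
    omega

-- ===== VERDICT (by name: the statement is the Claim_ definition above) =====
theorem solution_spec : Claim_equal_solution := by
  unfold Claim_equal_solution
  intro n info _ hpre
  unfold Spec_solution
  have hn : 0 ≤ n := hpre
  have hA : solution n info
      = (gfold (fun c => some (getScore c info)) (cwr score n.toNat)
          ((-1 : Int), ([-1] : List Int))).2 := by
    unfold solution
    simp only []
    rw [foldA_eq info _ _ (Or.inl rfl)]
    rfl
  have hslice : PySem.List.slice info none (some (10 : Int)) = info.take 10 := by
    rw [show ((10 : Int)) = ((10 : Nat) : Int) from by norm_num, PySem.List.slice_to_natCast]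
  have hBcomm := foldB_comm n (info.take 10)
    (List.range (2 ^ (info.take 10).length)) none
  rw [show flipSnd (toP none) = ((-1 : Int), ([-1] : List Int)) from rfl] at hBcomm
  obtain ⟨hBa, hBc, hBb⟩ := foldMax (fun mask => (candB n (info.take 10) mask).map flipSnd)
    (List.range (2 ^ (info.take 10).length)) ((-1 : Int), ([-1] : List Int))
  obtain ⟨hAa, hAc, hAb⟩ := foldMax (fun c => some (getScore c info))
    (cwr score n.toNat) ((-1 : Int), ([-1] : List Int))
  set RA := gfold (fun c => some (getScore c info)) (cwr score n.toNat)
    ((-1 : Int), ([-1] : List Int)) with hRAdef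
  set RB := gfold (fun mask => (candB n (info.take 10) mask).map flipSnd)
    (List.range (2 ^ (info.take 10).length)) ((-1 : Int), ([-1] : List Int)) with hRBdef
  have hRB1 : RB = ((-1 : Int), ([-1] : List Int)) ∨ 1 ≤ RB.1 := by
    rcases hBa with hB0 | ⟨mask, hmm, hfB⟩
    · left; exact hB0
    · right
      cases hcb : candB n (info.take 10) mask with
      | none => rw [hcb] at hfB; simp at hfB
      | some kd =>
        rw [hcb] at hfB
        simp only [Option.map_some, Option.some.injEq] at hfB
        have := candB_fst n (info.take 10) mask kd hcb
        rw [← hfB]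
        simpa [flipSnd] using this
  have h1 : ltb RA RB = false := by
    rcases hBa with hB0 | ⟨mask, hmm, hfB⟩
    · rw [hB0]; exact hAc
    · cases hcb : candB n (info.take 10) mask with
      | none => rw [hcb] at hfB; simp at hfB
      | some kd =>
        rw [hcb] at hfB
        simp only [Option.map_some, Option.some.injEq] at hfB
        obtain ⟨c, hcmem, hor⟩ := realize n info mask kd hcb
        have hmax := hAb c hcmem (getScore c info) rfl
        rcases hor with heqk | hltk
        · rw [← hfB, heqk]; exact hmax
        · by_contra hcon
          simp only [Bool.not_eq_false] at hcon
          rw [← hfB] at hcon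
          have := ltb_trans hcon hltk
          rw [this] at hmax
          cases hmax
  have h2 : ltb RB RA = false := by
    rcases hAa with hA0 | ⟨c, hcmem, hgs⟩
    · rw [hA0]; exact hBc
    · have hgs' : getScore c info = RA := Option.some.inj hgs
      have hshape := getScore_shape c info
      rw [hgs'] at hshape
      rcases hshape with hsh | ⟨hsh1, hsh2⟩
      · rw [hsh]
        rcases hRB1 with hrb | hge
        · rw [hrb]; decide
        · unfold ltb
          simp only [Bool.or_eq_false_iff, Bool.and_eq_false_iff, decide_eq_false_iff_not]
          refine ⟨by omega, ?_⟩
          left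
          omega
      · obtain ⟨mask, hmlt, kd, hkd, hdom⟩ := dominate n info hn c hcmem RA.1 RA.2
          (by rw [hgs']) hsh1
        have hmax := hBb mask (List.mem_range.mpr hmlt) (flipSnd kd) (by rw [hkd]; rfl)
        rcases hdom with hdeq | hdlt
        · have hra : RA = flipSnd kd := by
            rw [← hdeq]
          rw [hra]; exact hmax
        · by_contra hcon
          simp only [Bool.not_eq_false] at hcon
          have htr : ltb RB (flipSnd kd) = true := ltb_trans hcon hdlt
          rw [htr] at hmax; cases hmax
  have hRARB : RA = RB := ltb_conn h1 h2
  rw [hA]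
  unfold solution_alt
  simp only []
  rw [hslice]
  cases hbf : (List.range (2 ^ (info.take 10).length)).foldl (stepB n (info.take 10)) none with
  | none =>
    rw [hbf] at hBcomm
    have : RA = ((-1 : Int), ([-1] : List Int)) := by
      rw [hRARB, ← hBcomm]
      rfl
    rw [this]
  | some b =>
    rw [hbf] at hBcomm
    have : RA = (b.1, b.2.reverse) := by
      rw [hRARB, ← hBcomm]
      rfl
    rw [this]
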